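-- pv_equiv track=rewrite | github.com/ryancoll-gofish/ai_overview_tester | app.py | looks_informational
-- ===== SOURCE A (Python) =====
-- def looks_informational(page: str) -> bool:
--     p = str(page or "").lower()
--     patterns = [
--         "/blog/",
--         "/guide/",
--         "/guides/",
--         "/resources/",
--         "/learn/",
--         "/insights/",
--         "/articles/",
--         "/news/",
--         "/compare/",
--         "/comparison/",
--         "/best-",
--         "/what-is-",
--         "/how-to-",
--     ]
--     return any(pattern in p for pattern in patterns)
-- ===== SOURCE B (Python) =====
-- def looks_informational(page: str) -> bool:
--     p = str(page or "").lower()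
--     patterns = [
--         "/blog/",
--         "/guide/",
--         "/guides/",
--         "/resources/",
--         "/learn/",
--         "/insights/",
--         "/articles/",
--         "/news/",
--         "/compare/",
--         "/comparison/",
--         "/best-",
--         "/what-is-",
--         "/how-to-",
--     ]
--     # single left-to-right scan over positions: at each index, does any pattern start here?
--     return any(p.startswith(pat, i) for i in range(len(p)) for pat in patterns)
-- ===== Notes on version B (the rewrite author's own statement) =====
-- stated objective: alternative
-- what changed: Replaces A's 13 independent substring-containment scans (any(pattern in p)) by a single left-to-right scan over the positions of p, checking at each index whether any pattern starts there.
import Mathlib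
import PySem

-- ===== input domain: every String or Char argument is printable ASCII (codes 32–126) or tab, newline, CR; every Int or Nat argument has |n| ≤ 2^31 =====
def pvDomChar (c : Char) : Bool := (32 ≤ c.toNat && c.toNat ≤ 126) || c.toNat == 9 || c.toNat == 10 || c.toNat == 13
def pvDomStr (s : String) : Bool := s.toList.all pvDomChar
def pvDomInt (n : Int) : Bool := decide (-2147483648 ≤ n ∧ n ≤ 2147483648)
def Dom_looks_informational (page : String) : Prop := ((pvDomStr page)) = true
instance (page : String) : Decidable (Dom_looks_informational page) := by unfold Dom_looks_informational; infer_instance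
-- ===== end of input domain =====

-- B replaces A's 13 independent substring scans by one left-to-right scan over positions,
-- checking at each index whether some pattern starts there (objective: alternative).

def pvPatterns : List String :=
  ["/blog/", "/guide/", "/guides/", "/resources/", "/learn/", "/insights/",
   "/articles/", "/news/", "/compare/", "/comparison/", "/best-", "/what-is-", "/how-to-"]

-- ===== PORT A =====
-- `page or ""` : for a str argument this is page itself unless empty, and str("") = "",
-- so p = page.lower() in either case.
def looks_informational (page : String) : Bool :=
  let p := PySem.Str.lower page
  pvPatterns.any (fun pattern => PySem.Str.isIn pattern p)

-- ===== PORT B =====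
def looks_informational_alt (page : String) : Bool :=
  let p := (PySem.Str.lower page).toList
  (List.range p.length).any (fun i =>
    pvPatterns.any (fun pat => PySem.Chars.startswith (p.drop i) pat.toList))

-- ===== PRECONDITION & SPEC =====
def Spec_looks_informational (page : String) (out : Bool) : Prop := out = looks_informational_alt page
instance (page : String) (out : Bool) : Decidable (Spec_looks_informational page out) := by unfold Spec_looks_informational; infer_instance

-- ===== CLAIM (what is proved, stated in full; the proofs are below) =====
def Claim_equal_looks_informational : Prop := ∀ (page : String), Dom_looks_informational page → Spec_looks_informational page (looks_informational page)

-- ===== LEMMAS AND PROOFS =====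

-- a nonempty substring occurs in cs iff it starts at some in-range position
theorem isIn_eq_any_startswith (sub cs : List Char) (hne : sub ≠ []) :
    PySem.Chars.isIn sub cs
      = (List.range cs.length).any (fun i => PySem.Chars.startswith (cs.drop i) sub) := by
  rw [Bool.eq_iff_iff]
  constructor
  · intro h
    obtain ⟨j, hj⟩ := (PySem.Chars.exists_prefix_drop_iff_isIn sub cs).mpr h
    have hjlt : j < cs.length := by
      by_contra hge
      have : cs.drop j = [] := List.drop_eq_nil_of_le (le_of_not_gt hge)
      rw [this] at hj
      exact hne (List.prefix_nil.mp hj)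
    simp only [List.any_eq_true, List.mem_range]
    exact ⟨j, hjlt, (PySem.Chars.startswith_iff _ _).mpr hj⟩
  · intro h
    simp only [List.any_eq_true, List.mem_range] at h
    obtain ⟨j, _, hsw⟩ := h
    exact (PySem.Chars.exists_prefix_drop_iff_isIn sub cs).mp
      ⟨j, (PySem.Chars.startswith_iff _ _).mp hsw⟩

theorem pvPatterns_toList_ne_nil (pat : String) (h : pat ∈ pvPatterns) : pat.toList ≠ [] := by
  fin_cases h <;> decide

-- ===== VERDICT (by name: the statement is the Claim_ definition above) =====
theorem looks_informational_spec : Claim_equal_looks_informational := by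
  intro page _
  unfold Spec_looks_informational looks_informational looks_informational_alt
  rw [Bool.eq_iff_iff]
  simp only [List.any_eq_true, List.mem_range]
  constructor
  · rintro ⟨pat, hp, h⟩
    rw [PySem.Str.isIn_eq, isIn_eq_any_startswith _ _ (pvPatterns_toList_ne_nil pat hp), List.any_eq_true] at h
    obtain ⟨i, hi, hs⟩ := h
    exact ⟨i, List.mem_range.mp hi, pat, hp, hs⟩
  · rintro ⟨i, hi, pat, hp, hs⟩
    refine ⟨pat, hp, ?_⟩
    rw [PySem.Str.isIn_eq, isIn_eq_any_startswith _ _ (pvPatterns_toList_ne_nil pat hp), List.any_eq_true]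
    exact ⟨i, List.mem_range.mpr hi, hs⟩
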